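-- pv_equiv track=rewrite | github.com/TechnikEmpire/CareerGuide | backend/app/services/retrieval/rerank.py | _token_counts
-- ===== SOURCE A (Python) =====
-- def _token_counts(text: str) -> dict[str, int]:
--     counts: dict[str, int] = {}
--     for raw_token in text.lower().split():
--         token = "".join(character for character in raw_token if character.isalnum())
--         if not token:
--             continue
--         counts[token] = counts.get(token, 0) + 1
--     return counts
-- ===== SOURCE B (Python) =====
-- def _token_counts(text: str) -> dict[str, int]:
--     counts: dict[str, int] = {}
--     buf: list[str] = []
--     for ch in text.lower():
--         if ch.isspace():
--             if buf:
--                 token = "".join(buf)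
--                 counts[token] = counts.get(token, 0) + 1
--             buf = []
--         elif ch.isalnum():
--             buf.append(ch)
--     if buf:
--         token = "".join(buf)
--         counts[token] = counts.get(token, 0) + 1
--     return counts
-- ===== Notes on version B (the rewrite author's own statement) =====
-- stated objective: alternative
-- what changed: Replaces split()-then-join-filter over whole tokens by a single character-by-character scan that maintains a current-token buffer, flushing it into the counts on whitespace and at the end.
import Mathlib
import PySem

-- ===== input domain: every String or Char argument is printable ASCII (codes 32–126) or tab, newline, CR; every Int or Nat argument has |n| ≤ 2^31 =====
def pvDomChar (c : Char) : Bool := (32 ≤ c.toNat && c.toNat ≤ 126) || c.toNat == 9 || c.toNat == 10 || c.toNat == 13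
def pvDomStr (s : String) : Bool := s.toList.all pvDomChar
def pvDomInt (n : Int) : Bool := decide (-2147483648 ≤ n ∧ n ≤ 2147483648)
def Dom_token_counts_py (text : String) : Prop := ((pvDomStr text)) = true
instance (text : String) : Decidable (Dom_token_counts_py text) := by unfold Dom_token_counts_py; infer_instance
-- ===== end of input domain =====

-- B replaces A's split()-then-join-filter over whole tokens by a single character-by-character
-- scan with a current-token buffer (alternative decomposition, same cost).

-- ===== PORT A =====
-- counts[token] = counts.get(token, 0) + 1   (the identical line in both Pythons)
def tcBump (counts : PySem.Dict String Int) (token : String) : PySem.Dict String Int :=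
  counts.insert token (counts.getD token 0 + 1)

def token_counts_py (text : String) : List (String × Int) :=
  ((PySem.Str.split₀ (PySem.Str.lower text)).foldl
    (fun counts raw_token =>
      let token : String := String.ofList (raw_token.toList.filter PySem.Chars.isalnum)
      if token.toList.isEmpty then counts else tcBump counts token)
    PySem.Dict.empty).items

-- ===== PORT B =====
-- the char loop of Source B: buf is the current-token buffer, flushed on whitespace and at the end
def tcGo : List Char → PySem.Dict String Int → List Char → PySem.Dict String Int
  | [], counts, buf => if buf.isEmpty then counts else tcBump counts (String.ofList buf)
  | c :: rest, counts, buf =>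
    if PySem.Chars.isspace c then
      tcGo rest (if buf.isEmpty then counts else tcBump counts (String.ofList buf)) []
    else if PySem.Chars.isalnum c then
      tcGo rest counts (buf ++ [c])
    else
      tcGo rest counts buf

def token_counts_py_alt (text : String) : List (String × Int) :=
  (tcGo (PySem.Chars.lower text.toList) PySem.Dict.empty []).items

-- ===== PRECONDITION & SPEC =====
def Spec_token_counts_py (text : String) (out : List (String × Int)) : Prop := out = token_counts_py_alt text
instance (text : String) (out : List (String × Int)) : Decidable (Spec_token_counts_py text out) := by unfold Spec_token_counts_py; infer_instance

-- ===== CLAIM (what is proved, stated in full; the proofs are below) =====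
def Claim_equal_token_counts_py : Prop := ∀ (text : String), Dom_token_counts_py text → Spec_token_counts_py text (token_counts_py text)

-- ===== LEMMAS AND PROOFS =====

-- A's per-token step, on the List Char side
def tcStep (counts : PySem.Dict String Int) (raw : List Char) : PySem.Dict String Int :=
  let t := raw.filter PySem.Chars.isalnum
  if t.isEmpty then counts else tcBump counts (String.ofList t)

lemma split₀_go_acc (ls cur : List Char) (acc : List (List Char)) :
    PySem.Chars.split₀.go ls cur acc = acc.reverse ++ PySem.Chars.split₀.go ls cur [] := by
  induction ls generalizing cur acc with
  | nil =>
    simp only [PySem.Chars.split₀.go]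
    split_ifs <;> simp
  | cons c rest ih =>
    simp only [PySem.Chars.split₀.go]
    split_ifs with h1 h2
    · rw [ih [] acc]
    · rw [ih [] (cur.reverse :: acc), ih [] [cur.reverse]]
      simp
    · exact ih (c :: cur) acc

lemma filter_reverse_cons (cur : List Char) (c : Char) :
    (c :: cur).reverse.filter PySem.Chars.isalnum
      = cur.reverse.filter PySem.Chars.isalnum ++ (if PySem.Chars.isalnum c then [c] else []) := by
  simp [List.filter_append]
  split_ifs <;> simp_all

lemma go_nil (cur : List Char) (acc : List (List Char)) :
    PySem.Chars.split₀.go [] cur acc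
      = if cur.isEmpty then acc.reverse else (cur.reverse :: acc).reverse := by
  simp only [PySem.Chars.split₀.go]

lemma tcGo_nil (counts : PySem.Dict String Int) (buf : List Char) :
    tcGo [] counts buf = if buf.isEmpty then counts else tcBump counts (String.ofList buf) := by
  simp only [tcGo]

lemma nilcase1 (counts : PySem.Dict String Int) :
    tcGo [] counts (([] : List Char).reverse.filter PySem.Chars.isalnum)
      = (PySem.Chars.split₀.go [] [] []).foldl tcStep counts := by
  rw [go_nil, tcGo_nil]
  simp

lemma nilcase2 (cur : List Char) (h : ¬ cur.isEmpty) (counts : PySem.Dict String Int) :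
    tcGo [] counts (cur.reverse.filter PySem.Chars.isalnum)
      = (PySem.Chars.split₀.go [] cur []).foldl tcStep counts := by
  rw [go_nil, tcGo_nil, if_neg h]
  show _ = tcStep counts cur.reverse
  rw [tcStep]

lemma tcGo_eq_foldl (ls : List Char) (cur : List Char) (counts : PySem.Dict String Int) :
    tcGo ls counts (cur.reverse.filter PySem.Chars.isalnum)
      = (PySem.Chars.split₀.go ls cur []).foldl tcStep counts := by
  induction ls generalizing cur counts with
  | nil =>
    by_cases h : cur.isEmpty
    · have hc : cur = [] := by simpa using h
      subst hc
      exact nilcase1 counts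
    · exact nilcase2 cur h counts
  | cons c rest ih =>
    by_cases hs : PySem.Chars.isspace c
    · have flush :
          tcGo (c :: rest) counts (cur.reverse.filter PySem.Chars.isalnum)
            = tcGo rest (tcStep counts cur.reverse) [] := by
        simp only [tcGo, hs, if_true, tcStep]
      have hgo : PySem.Chars.split₀.go (c :: rest) cur []
          = (if cur.isEmpty then ([] : List (List Char)) else [cur.reverse])
              ++ PySem.Chars.split₀.go rest [] [] := by
        simp only [PySem.Chars.split₀.go, hs, if_true]
        by_cases h : cur.isEmpty
        · rw [if_pos h, if_pos h]
          rfl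
        · rw [if_neg h, if_neg h]
          rw [split₀_go_acc rest [] [cur.reverse]]
          rfl
      rw [flush, hgo, List.foldl_append]
      have h0 := ih [] (tcStep counts cur.reverse)
      simp only [List.reverse_nil, List.filter_nil] at h0
      rw [h0]
      congr 1
      by_cases h : cur.isEmpty
      · have hc : cur = [] := by simpa using h
        subst hc
        rfl
      · rw [if_neg h]
        rfl
    · have hgo : PySem.Chars.split₀.go (c :: rest) cur []
          = PySem.Chars.split₀.go rest (c :: cur) [] := by
        simp only [PySem.Chars.split₀.go, hs, if_false, Bool.false_eq_true]
      have h1 : tcGo (c :: rest) counts (cur.reverse.filter PySem.Chars.isalnum)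
          = tcGo rest counts ((c :: cur).reverse.filter PySem.Chars.isalnum) := by
        rw [filter_reverse_cons]
        by_cases ha : PySem.Chars.isalnum c
        · simp only [tcGo, hs, ha, if_true, if_false, Bool.false_eq_true]
        · simp only [tcGo, hs, ha, if_false, Bool.false_eq_true, List.append_nil]
      rw [h1, hgo, ih (c :: cur) counts]

lemma tcGo_eq_split₀ (ls : List Char) (counts : PySem.Dict String Int) :
    tcGo ls counts [] = (PySem.Chars.split₀ ls).foldl tcStep counts := by
  have := tcGo_eq_foldl ls [] counts
  simpa [PySem.Chars.split₀] using this

-- ===== VERDICT (by name: the statement is the Claim_ definition above) =====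
theorem token_counts_py_spec : Claim_equal_token_counts_py := by
  intro text _
  unfold Spec_token_counts_py token_counts_py token_counts_py_alt
  rw [← PySem.Str.toList_lower, tcGo_eq_split₀, ← PySem.Str.split₀_map_toList, List.foldl_map]
  have hf : (fun (counts : PySem.Dict String Int) (raw_token : String) =>
      let token : String := String.ofList (raw_token.toList.filter PySem.Chars.isalnum)
      if token.toList.isEmpty then counts else tcBump counts token)
      = (fun counts s => tcStep counts s.toList) := by
    funext counts s
    simp only [tcStep, String.toList_ofList]
  rw [hf]
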